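-- pv_equiv track=rewrite | github.com/static-frame/static-frame | static_frame/test/property/strategies.py | subset_contiguous_sum
-- ===== SOURCE A (Python) =====
-- import typing as tp
-- from functools import lru_cache
--
-- def subset_contiguous_sum(target: int) -> tp.Tuple[tp.Tuple[int, ...], ...]:
--     '''
--     Return an iterabel of integers that sum to the target. This does not find all combinations or permutations, just all combintation of the range from 1 to the number (inclusive).
--     '''
--     # based on https://stackoverflow.com/questions/4632322/finding-all-possible-combinations-of-numbers-to-reach-a-given-sum
--
--     if target == 0:
--         return ()
--
--     if not 0 < target <= 32:
--         # over sizes of 60 or so performance is noticieable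
--         raise RuntimeError(f'target is too large: {target}')
--
--     @lru_cache()
--     def subset_sum(
--             numbers: tp.Sequence[int], partial: tp.Tuple[int, ...] = (), partial_sum: int = 0,
--         ) -> tp.Iterator[tp.Tuple[int, ...]]:
--         if partial_sum == target:
--             yield partial
--         if partial_sum > target:
--             return
--         for i, n in enumerate(numbers, start=1):
--             # get pairs of index (starting at 1) and n (the value at each position)
--             yield from subset_sum(numbers[i:], partial + (n,), partial_sum + n)
--
--     return tuple(subset_sum(range(1, target+1)))
-- ===== SOURCE B (Python) =====
-- def subset_contiguous_sum(target):
--     '''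
--     Return an iterable of tuples of integers from 1..target that sum to target.
--     '''
--     if target == 0:
--         return ()
--     if not 0 < target <= 32:
--         raise RuntimeError(f'target is too large: {target}')
--
--     def parts(lo, s):
--         # all strictly increasing tuples with parts >= lo summing to s
--         if s == 0:
--             return [()]
--         return [(k,) + p for k in range(lo, s + 1) for p in parts(k + 1, s - k)]
--
--     return tuple(parts(1, target))
-- ===== Notes on version B (the rewrite author's own statement) =====
-- stated objective: faster
-- what changed: A prunes a generate-and-test scan over subsequences of the candidate list range(1, target+1), threading a partial tuple and partial sum; B drops the candidate list and filtering entirely and directly enumerates the increasing part lists by recursing on the smallest part and the remaining sum, which yields the same lexicographic order with no pruning dead weight.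
import Mathlib
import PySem

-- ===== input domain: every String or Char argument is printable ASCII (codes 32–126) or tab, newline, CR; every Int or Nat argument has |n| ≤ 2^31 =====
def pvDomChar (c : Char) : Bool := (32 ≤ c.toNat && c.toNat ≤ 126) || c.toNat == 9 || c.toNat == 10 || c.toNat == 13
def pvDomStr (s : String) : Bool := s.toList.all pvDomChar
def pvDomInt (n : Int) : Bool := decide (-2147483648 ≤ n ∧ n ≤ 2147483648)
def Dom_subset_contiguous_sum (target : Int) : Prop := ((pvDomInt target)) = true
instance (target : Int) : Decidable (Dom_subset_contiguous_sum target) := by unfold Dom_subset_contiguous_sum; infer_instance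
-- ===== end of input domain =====

-- B replaces A's pruned generate-and-test search over subsequences of range(1, target+1)
-- by a direct enumeration of the increasing part lists via their smallest part (objective:
-- faster; the size-scaled timing run cannot measure it since A raises above 32).

-- ===== PORT A =====
-- subset_sum: the recursive generator, ported as structural recursion on the numbers list.
-- The 'for i, n in enumerate(...): yield from subset_sum(numbers[i:], ...)' loop walks the
-- suffixes of numbers; the recursive call's body (the two guards, then the loop on the
-- suffix) is inlined at the call site so the recursion is structural on the list.
def ssALoop (target : Int) : List Int → List Int → Int → List (List Int)
  | [], _, _ => []
  | n :: rest, part, psum =>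
      ((if psum + n = target then [part ++ [n]] else []) ++
       (if psum + n > target then [] else ssALoop target rest (part ++ [n]) (psum + n)))
      ++ ssALoop target rest part psum

def subset_contiguous_sum (target : Int) : List (List Int) :=
  if target = 0 then []
  else if ¬(0 < target ∧ target ≤ 32) then []  -- Python raises RuntimeError here; excluded by Pre_
  else  -- initial subset_sum call with part = (), psum = 0: the two guards, then the loop
    (if (0 : Int) = target then [([] : List Int)] else []) ++
    (if (0 : Int) > target then [] else ssALoop target (PySem.List.pyRange 1 (target + 1) 1) [] 0)

-- ===== PORT B =====
-- parts(lo, s): all strictly increasing lists with entries ≥ lo summing to s.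
-- The fuel argument only makes the recursion total in Lean: the top-level call passes
-- fuel = target.toNat + 1, which exceeds the recursion depth (each level consumes k ≥ 1
-- of s), so the fuel-0 branch is never reached on the calls the Python performs.
def partsB : Nat → Int → Int → List (List Int)
  | 0, _, _ => []
  | f + 1, lo, s =>
      if s = 0 then [[]]
      else (PySem.List.pyRange lo (s + 1) 1).flatMap
             (fun k => (partsB f (k + 1) (s - k)).map (fun p => k :: p))

def subset_contiguous_sum_alt (target : Int) : List (List Int) :=
  if target = 0 then []
  else if ¬(0 < target ∧ target ≤ 32) then []  -- Python raises RuntimeError here; excluded by Pre_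
  else partsB (target.toNat + 1) 1 target

-- ===== PRECONDITION & SPEC =====
-- Pre_ excludes exactly the inputs on which A raises RuntimeError (target < 0 or target > 32).
def Pre_subset_contiguous_sum (target : Int) : Prop := target = 0 ∨ (0 < target ∧ target ≤ 32)
instance (target : Int) : Decidable (Pre_subset_contiguous_sum target) := by unfold Pre_subset_contiguous_sum; infer_instance
def pvWitness_subset_contiguous_sum : Int := (8)

def Spec_subset_contiguous_sum (target : Int) (out : List (List Int)) : Prop := out = subset_contiguous_sum_alt target
instance (target : Int) (out : List (List Int)) : Decidable (Spec_subset_contiguous_sum target out) := by unfold Spec_subset_contiguous_sum; infer_instance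

-- ===== CLAIM (what is proved, stated in full; the proofs are below) =====
def Claim_equal_subset_contiguous_sum : Prop := ∀ (target : Int), Dom_subset_contiguous_sum target → Pre_subset_contiguous_sum target → Spec_subset_contiguous_sum target (subset_contiguous_sum target)

-- ===== LEMMAS AND PROOFS =====

-- partsB does not depend on the fuel once the fuel exceeds s (for lower bounds ≥ 1).
theorem partsB_fuel (f : Nat) : ∀ (g : Nat) (lo s : Int), 1 ≤ lo → s.toNat < f → s.toNat < g →
    partsB f lo s = partsB g lo s := by
  induction f with
  | zero => intro g lo s _ hf _; omega
  | succ f ih =>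
    intro g lo s hlo hf hg
    match g, hg with
    | g + 1, _ =>
      simp only [partsB]
      by_cases hs : s = 0
      · simp [hs]
      · simp only [if_neg hs, List.flatMap_def]
        congr 1
        apply List.map_congr_left
        intro k hk
        rw [PySem.List.mem_pyRange_one] at hk
        have h1 : 1 ≤ k + 1 := by omega
        have h2 : (s - k).toNat < f := by omega
        have h3 : (s - k).toNat < g := by omega
        rw [ih g (k + 1) (s - k) h1 h2 h3]

-- Key correspondence: A's pruned scan of the candidate suffix range(lo, t+1) with
-- partial sum t - s emits exactly part ++ p for the nonempty p in parts(lo, s).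
theorem ssALoop_eq_partsB (t : Int) : ∀ (n : Nat) (lo s : Int) (part : List Int),
    1 ≤ lo → 0 ≤ s → s ≤ t → (t + 1 - lo).toNat = n →
    ssALoop t (PySem.List.pyRange lo (t + 1) 1) part (t - s)
      = if s = 0 then [] else (partsB (s.toNat + 1) lo s).map (fun p => part ++ p) := by
  intro n
  induction n with
  | zero =>
    intro lo s part hlo hs0 hst hn
    have hge : t + 1 ≤ lo := by omega
    rw [PySem.List.pyRange_one_eq_nil hge]
    by_cases hs : s = 0
    · simp [hs, ssALoop]
    · have : PySem.List.pyRange lo (s + 1) 1 = [] :=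
        PySem.List.pyRange_one_eq_nil (by omega)
      simp [hs, ssALoop, partsB, this]
  | succ n ih =>
    intro lo s part hlo hs0 hst hn
    have hlt : lo < t + 1 := by omega
    have hn' : (t + 1 - (lo + 1)).toNat = n := by omega
    rw [PySem.List.pyRange_one_cons hlt]
    simp only [ssALoop]
    by_cases hls : lo ≤ s
    · -- candidate lo still fits: s ≥ lo ≥ 1, so s ≠ 0
      have hsne : s ≠ 0 := by omega
      have heq : t - s + lo = t - (s - lo) := by ring
      rw [heq]
      have ih2 := ih (lo + 1) (s - lo) (part ++ [lo]) (by omega) (by omega) (by omega) hn'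
      have ih3 := ih (lo + 1) s part (by omega) hs0 hst hn'
      rw [if_neg (show ¬ (t - (s - lo) > t) by omega), ih2, ih3, if_neg hsne]
      -- unfold partsB at s (fuel s.toNat + 1) and split off the k = lo block
      have hexp : partsB (s.toNat + 1) lo s
          = (partsB s.toNat (lo + 1) (s - lo)).map (fun p => lo :: p)
            ++ (PySem.List.pyRange (lo + 1) (s + 1) 1).flatMap
                 (fun k => (partsB s.toNat (k + 1) (s - k)).map (fun p => k :: p)) := by
        conv_lhs => rw [partsB, if_neg hsne, PySem.List.pyRange_one_cons (by omega : lo < s + 1)]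
        rw [List.flatMap_cons]
      have htail : (PySem.List.pyRange (lo + 1) (s + 1) 1).flatMap
                 (fun k => (partsB s.toNat (k + 1) (s - k)).map (fun p => k :: p))
          = partsB (s.toNat + 1) (lo + 1) s := by
        rw [partsB, if_neg hsne]
      have hfuel : partsB s.toNat (lo + 1) (s - lo) = partsB ((s - lo).toNat + 1) (lo + 1) (s - lo) :=
        partsB_fuel _ _ _ _ (by omega) (by omega) (by omega)
      rw [hexp, htail, hfuel]
      by_cases hsl : s - lo = 0
      · -- lo = s: the head block is the single yield part ++ [lo]
        rw [if_pos (show t - (s - lo) = t by omega), if_pos hsl, hsl]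
        simp [partsB, hsne]
      · rw [if_neg (show ¬ (t - (s - lo) = t) by omega), if_neg hsl]
        simp [hsne, List.map_map, Function.comp_def, List.map_append]
    · -- candidate lo overshoots: no yield, no descent; both heads vanish
      have hc1 : ¬ (t - s + lo = t) := by omega
      have hc2 : t - s + lo > t := by omega
      have ih3 := ih (lo + 1) s part (by omega) hs0 hst hn'
      rw [if_neg hc1, if_pos hc2, ih3]
      by_cases hs : s = 0
      · simp [hs]
      · have e1 : partsB (s.toNat + 1) lo s = [] := by
          rw [partsB, if_neg hs, PySem.List.pyRange_one_eq_nil (by omega), List.flatMap_nil]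
        have e2 : partsB (s.toNat + 1) (lo + 1) s = [] := by
          rw [partsB, if_neg hs, PySem.List.pyRange_one_eq_nil (by omega), List.flatMap_nil]
        simp [hs, e1, e2]

-- ===== VERDICT (by name: the statement is the Claim_ definition above) =====
theorem subset_contiguous_sum_spec : Claim_equal_subset_contiguous_sum := by
  intro target _ hpre
  unfold Spec_subset_contiguous_sum subset_contiguous_sum subset_contiguous_sum_alt
  rcases hpre with h0 | ⟨h1, h2⟩
  · simp [h0]
  · have hne : target ≠ 0 := by omega
    rw [if_neg hne, if_neg hne, if_neg (by omega : ¬ ¬ (0 < target ∧ target ≤ 32)),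
        if_neg (by omega : ¬ ¬ (0 < target ∧ target ≤ 32)),
        if_neg (by omega : ¬ ((0 : Int) = target)), if_neg (by omega : ¬ ((0 : Int) > target))]
    have h := ssALoop_eq_partsB target (target + 1 - 1).toNat 1 target [] (by omega) (by omega)
      (by omega) rfl
    rw [(by omega : target - target = (0 : Int))] at h
    rw [List.nil_append, h, if_neg hne]
    simp
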